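-- pv_equiv track=rewrite | github.com/wojcikiewicz17/GAIA_phi | dados/RAFAELIA_TOROID_BITFLOW.py | generate_all_bitraf_flows
-- ===== SOURCE A (Python) =====
-- from typing import Dict, List, Tuple
--
-- def binary_bitflow_for_den(den: int, n_bits: int = 256) -> str:
--     """
--     Generate a deterministic binary bitflow for a given denominator 'den',
--     using the binary expansion of 1/den up to n_bits bits.
--
--     Algorithm:
--       r = 1 % den
--       for i in range(n_bits):
--           r *= 2
--           if r >= den:
--               bit = '1'
--               r -= den
--           else:
--               bit = '0'
--
--     This avoids floating point and is reproducible across runs.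
--
--     Args:
--         den: positive integer denominator (den != 0).
--         n_bits: number of bits to generate.
--
--     Returns:
--         A string of '0'/'1' characters of length n_bits.
--
--     Error handling:
--         Raises ValueError if den <= 0 or n_bits <= 0.
--     """
--     if den <= 0:
--         raise ValueError("Denominator must be positive.")
--     if n_bits <= 0:
--         raise ValueError("Number of bits must be positive.")
--
--     r = 1 % den
--     bits: List[str] = []
--
--     for _ in range(n_bits):
--         r *= 2
--         if r >= den:
--             bits.append("1")
--             r -= den
--         else:
--             bits.append("0")
--
--     return "".join(bits)
--
-- def generate_all_bitraf_flows(
--     dens: List[int],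
--     n_bits: int = 256,
-- ) -> Dict[int, str]:
--     """
--     Generate bitflows for a list of denominators.
--
--     Returns:
--         A dictionary {den: bitflow_str}.
--     """
--     flows: Dict[int, str] = {}
--     for den in dens:
--         flows[den] = binary_bitflow_for_den(den, n_bits=n_bits)
--     return flows
-- ===== SOURCE B (Python) =====
-- from typing import Dict, List
--
--
-- def binary_bitflow_for_den(den: int, n_bits: int = 256) -> str:
--     """Bit i (1-based) of the binary expansion of 1/den is floor(2**i / den) mod 2,
--     computed directly as pow(2, i, 2*den) // den -- no running remainder needed."""
--     if den <= 0:
--         raise ValueError("Denominator must be positive.")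
--     if n_bits <= 0:
--         raise ValueError("Number of bits must be positive.")
--     m = 2 * den
--     return "".join(str(pow(2, i, m) // den) for i in range(1, n_bits + 1))
--
--
-- def generate_all_bitraf_flows(
--     dens: List[int],
--     n_bits: int = 256,
-- ) -> Dict[int, str]:
--     return {den: binary_bitflow_for_den(den, n_bits=n_bits) for den in dens}
-- ===== Notes on version B (the rewrite author's own statement) =====
-- stated objective: alternative
-- what changed: Each bit is computed independently by the closed form pow(2, i, 2*den) // den (the i-th bit of the binary expansion of 1/den) joined in a comprehension, instead of threading a running remainder through a sequential loop; the outer function becomes a dict comprehension.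
import Mathlib
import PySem

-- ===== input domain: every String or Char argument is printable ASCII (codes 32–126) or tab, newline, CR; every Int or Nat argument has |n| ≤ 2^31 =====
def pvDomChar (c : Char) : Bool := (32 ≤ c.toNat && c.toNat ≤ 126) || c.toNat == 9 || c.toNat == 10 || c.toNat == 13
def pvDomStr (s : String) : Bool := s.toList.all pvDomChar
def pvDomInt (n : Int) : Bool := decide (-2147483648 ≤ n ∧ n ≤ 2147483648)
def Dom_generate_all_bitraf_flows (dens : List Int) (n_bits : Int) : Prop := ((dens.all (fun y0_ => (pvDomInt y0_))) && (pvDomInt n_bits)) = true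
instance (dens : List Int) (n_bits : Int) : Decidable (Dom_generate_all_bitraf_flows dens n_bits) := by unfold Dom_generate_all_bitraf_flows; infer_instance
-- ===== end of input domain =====

-- B computes every bit of 1/den's binary expansion independently by the closed form pow(2,i,2*den)//den instead of carrying a running remainder (objective: alternative decomposition, same cost).

-- ===== PORT A =====
-- the loop 'for _ in range(n_bits): r *= 2; append bit; maybe r -= den' of binary_bitflow_for_den
def pvLoopA (den : Int) : Nat → Int → List String
  | 0, _ => []
  | n+1, r =>
    if r * 2 ≥ den then "1" :: pvLoopA den n (r * 2 - den)
    else "0" :: pvLoopA den n (r * 2)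

-- ValueError branches return "" here; those inputs are excluded by Pre_generate_all_bitraf_flows
def binary_bitflow_for_den_A (den : Int) (n_bits : Int) : String :=
  if den ≤ 0 then ""
  else if n_bits ≤ 0 then ""
  else String.join (pvLoopA den n_bits.toNat (PySem.Int.mod 1 den))

def generate_all_bitraf_flows (dens : List Int) (n_bits : Int) : List (Int × String) :=
  (dens.foldl (fun flows den => flows.insert den (binary_bitflow_for_den_A den n_bits))
    (PySem.Dict.empty : PySem.Dict Int String)).items

-- ===== PORT B =====
-- ValueError branches return "" here; those inputs are excluded by Pre_generate_all_bitraf_flows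
def binary_bitflow_for_den_B (den : Int) (n_bits : Int) : String :=
  if den ≤ 0 then ""
  else if n_bits ≤ 0 then ""
  else
    let m := 2 * den
    String.join ((PySem.List.pyRange 1 (n_bits + 1) 1).map
      (fun i => PySem.Int.toStr (PySem.Int.floordiv (PySem.Int.powMod 2 i.toNat m) den)))

def generate_all_bitraf_flows_alt (dens : List Int) (n_bits : Int) : List (Int × String) :=
  (dens.foldl (fun flows den => flows.insert den (binary_bitflow_for_den_B den n_bits))
    (PySem.Dict.empty : PySem.Dict Int String)).items

-- ===== PRECONDITION & SPEC =====
-- Pre_ excludes exactly the inputs where Python A raises ValueError: a non-positive denominator,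
-- or a non-positive n_bits reached with at least one denominator to process.
def Pre_generate_all_bitraf_flows (dens : List Int) (n_bits : Int) : Prop :=
  (∀ den ∈ dens, 0 < den) ∧ (dens = [] ∨ 0 < n_bits)
instance (dens : List Int) (n_bits : Int) : Decidable (Pre_generate_all_bitraf_flows dens n_bits) := by
  unfold Pre_generate_all_bitraf_flows; infer_instance

def pvWitness_generate_all_bitraf_flows : List Int × Int := ([3, 5], 8)

def Spec_generate_all_bitraf_flows (dens : List Int) (n_bits : Int) (out : List (Int × String)) : Prop := out = generate_all_bitraf_flows_alt dens n_bits
instance (dens : List Int) (n_bits : Int) (out : List (Int × String)) : Decidable (Spec_generate_all_bitraf_flows dens n_bits out) := by unfold Spec_generate_all_bitraf_flows; infer_instance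

-- ===== CLAIM (what is proved, stated in full; the proofs are below) =====
def Claim_equal_generate_all_bitraf_flows : Prop := ∀ (dens : List Int) (n_bits : Int), Dom_generate_all_bitraf_flows dens n_bits → Pre_generate_all_bitraf_flows dens n_bits → Spec_generate_all_bitraf_flows dens n_bits (generate_all_bitraf_flows dens n_bits)

-- ===== LEMMAS AND PROOFS =====

-- doubling a number mod a positive den: conditional subtraction form (this is A's loop step)
theorem pv_step_mod (den x : Int) (hden : 0 < den) :
    (2 * x) % den = if den ≤ 2 * (x % den) then 2 * (x % den) - den else 2 * (x % den) := by
  have hd : den * (x / den) + x % den = x := Int.mul_ediv_add_emod x den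
  have hr0 : 0 ≤ x % den := Int.emod_nonneg x (ne_of_gt hden)
  have hr1 : x % den < den := Int.emod_lt_of_pos x hden
  by_cases h : den ≤ 2 * (x % den)
  · rw [if_pos h]
    have he : 2 * x = (2 * (x % den) - den) + den * (2 * (x / den) + 1) := by ring_nf; omega
    rw [he, Int.add_mul_emod_self_left, Int.emod_eq_of_lt (by omega) (by omega)]
  · rw [if_neg h]
    have he : 2 * x = 2 * (x % den) + den * (2 * (x / den)) := by ring_nf; omega
    rw [he, Int.add_mul_emod_self_left, Int.emod_eq_of_lt (by omega) (by omega)]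

-- 2r / den is the bit A's comparison produces, for 0 ≤ r < den
theorem pv_bit_div (den r : Int) (hr0 : 0 ≤ r) (hr1 : r < den) :
    (2 * r) / den = if den ≤ 2 * r then 1 else 0 := by
  by_cases h : den ≤ 2 * r
  · rw [if_pos h]
    have he : 2 * r = (2 * r - den) + den * 1 := by ring_nf
    rw [he, Int.add_mul_ediv_left _ _ (by omega), Int.ediv_eq_zero_of_lt (by omega) (by omega)]
    omega
  · rw [if_neg h]
    exact Int.ediv_eq_zero_of_lt (by omega) (by omega)

-- A's remainder loop, started at 2^k mod den, produces exactly B's closed-form bits for exponents k+1, k+2, …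
theorem pv_loopA_eq (den : Int) (hden : 0 < den) :
    ∀ (n k : Nat), pvLoopA den n ((2:Int)^k % den) =
      (List.range n).map (fun j => PySem.Int.toStr (((2:Int)^(k+1+j) % (2*den)) / den)) := by
  intro n
  induction n with
  | zero => intro k; simp [pvLoopA]
  | succ n ih =>
    intro k
    have hr0 : 0 ≤ (2:Int)^k % den := Int.emod_nonneg _ (ne_of_gt hden)
    have hr1 : (2:Int)^k % den < den := Int.emod_lt_of_pos _ hden
    have hpow : (2:Int)^(k+1) = 2 * 2^k := by ring
    have hmod2d : (2:Int)^(k+1) % (2*den) = 2 * ((2:Int)^k % den) := by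
      rw [hpow, Int.mul_emod_mul_of_pos _ _ (by omega : (0:Int) < 2)]
    have hrem : (2:Int)^(k+1) % den =
        if den ≤ 2 * ((2:Int)^k % den) then 2 * ((2:Int)^k % den) - den
        else 2 * ((2:Int)^k % den) := by
      rw [hpow, pv_step_mod den _ hden]
    have hbit : (((2:Int)^(k+1+0) % (2*den)) / den) =
        if den ≤ 2 * ((2:Int)^k % den) then 1 else 0 := by
      rw [Nat.add_zero, hmod2d, pv_bit_div den _ hr0 hr1]
    rw [List.range_succ_eq_map, List.map_cons, List.map_map]
    by_cases h : den ≤ 2 * ((2:Int)^k % den)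
    · have hhead : PySem.Int.toStr (((2:Int)^(k+1+0) % (2*den)) / den) = "1" := by
        rw [hbit, if_pos h]; rfl
      show pvLoopA den (n+1) ((2:Int)^k % den) = _
      rw [pvLoopA, if_pos (by omega : ((2:Int)^k % den) * 2 ≥ den)]
      have hr' : (2:Int)^k % den * 2 - den = (2:Int)^(k+1) % den := by rw [hrem, if_pos h]; ring
      rw [hr', ih (k+1), hhead]
      have hexp : ∀ j : Nat, k+1+1+j = k+1+(j+1) := fun j => by omega
      simp only [Function.comp_def, hexp]
    · have hhead : PySem.Int.toStr (((2:Int)^(k+1+0) % (2*den)) / den) = "0" := by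
        rw [hbit, if_neg h]; rfl
      show pvLoopA den (n+1) ((2:Int)^k % den) = _
      rw [pvLoopA, if_neg (by omega : ¬ ((2:Int)^k % den) * 2 ≥ den)]
      have hr' : (2:Int)^k % den * 2 = (2:Int)^(k+1) % den := by rw [hrem, if_neg h]; ring
      rw [hr', ih (k+1), hhead]
      have hexp : ∀ j : Nat, k+1+1+j = k+1+(j+1) := fun j => by omega
      simp only [Function.comp_def, hexp]

theorem pv_flow_eq (den n_bits : Int) :
    binary_bitflow_for_den_A den n_bits = binary_bitflow_for_den_B den n_bits := by
  unfold binary_bitflow_for_den_A binary_bitflow_for_den_B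
  by_cases hden : den ≤ 0
  · simp [hden]
  · by_cases hn : n_bits ≤ 0
    · simp [hden, hn]
    · have hd : (0:Int) < den := by omega
      rw [if_neg hden, if_neg hn, if_neg hden, if_neg hn]
      congr 1
      rw [PySem.List.pyRange_one, List.map_map]
      have h1 : (n_bits + 1 - 1).toNat = n_bits.toNat := by omega
      rw [h1]
      have h2 : PySem.Int.mod 1 den = (2:Int)^0 % den := by
        rw [PySem.Int.mod_eq_emod_of_pos hd, pow_zero]
      rw [h2, pv_loopA_eq den hd n_bits.toNat 0]
      apply List.map_congr_left
      intro k _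
      simp only [Function.comp_def, PySem.Int.powMod,
        PySem.Int.mod_eq_emod_of_pos (by omega : (0:Int) < 2*den),
        PySem.Int.floordiv_eq_ediv_of_pos hd]
      have h3 : ((1:Int) + (k:Int)).toNat = 0 + 1 + k := by omega
      rw [h3]

-- ===== VERDICT (by name: the statement is the Claim_ definition above) =====
theorem generate_all_bitraf_flows_spec : Claim_equal_generate_all_bitraf_flows := by
  intro dens n_bits _ _
  show generate_all_bitraf_flows dens n_bits = generate_all_bitraf_flows_alt dens n_bits
  unfold generate_all_bitraf_flows generate_all_bitraf_flows_alt
  simp only [pv_flow_eq]
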